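-- pv_equiv track=rewrite | github.com/hydronia-nick/hydronia-docs | scripts/engine_reference/md_postprocess.py | _parse_column_boundaries
-- ===== SOURCE A (Python) =====
-- def _parse_column_boundaries(sep_line: str) -> list[tuple[int, int]]:
--     """Return [(start, end)] positions of each dash run in a multiline
--     table separator line."""
--     bounds: list[tuple[int, int]] = []
--     in_run = False
--     start = 0
--     for i, c in enumerate(sep_line):
--         if c == "-" and not in_run:
--             in_run = True
--             start = i
--         elif c != "-" and in_run:
--             in_run = False
--             bounds.append((start, i))
--     if in_run:
--         bounds.append((start, len(sep_line)))
--     return bounds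
-- ===== SOURCE B (Python) =====
-- def _parse_column_boundaries(sep_line: str) -> list[tuple[int, int]]:
--     """Return [(start, end)] positions of each dash run in a multiline
--     table separator line."""
--     bounds = []
--     n = len(sep_line)
--     i = 0
--     while i < n:
--         if sep_line[i] != "-":
--             i += 1
--             continue
--         j = i + 1
--         while j < n and sep_line[j] == "-":
--             j += 1
--         bounds.append((i, j))
--         i = j
--     return bounds
-- ===== Notes on version B (the rewrite author's own statement) =====
-- stated objective: alternative
-- what changed: Replaces the per-character in_run/start boolean state machine with a post-loop flush by a run-consuming scan: on hitting a dash it consumes the whole maximal run at once, emits (i, j) immediately, and jumps past it; no flag and no trailing flush exist.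
import Mathlib
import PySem

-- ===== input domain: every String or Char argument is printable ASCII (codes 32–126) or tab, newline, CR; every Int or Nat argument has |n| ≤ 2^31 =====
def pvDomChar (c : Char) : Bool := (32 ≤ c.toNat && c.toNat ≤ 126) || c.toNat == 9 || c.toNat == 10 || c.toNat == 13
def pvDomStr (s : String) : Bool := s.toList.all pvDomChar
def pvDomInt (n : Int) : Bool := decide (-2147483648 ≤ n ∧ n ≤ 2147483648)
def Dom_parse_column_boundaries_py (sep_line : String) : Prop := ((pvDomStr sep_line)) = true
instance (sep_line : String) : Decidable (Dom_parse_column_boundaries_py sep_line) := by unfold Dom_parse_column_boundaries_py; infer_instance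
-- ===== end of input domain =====

-- B replaces A's in_run/start state machine (with trailing flush) by a run-consuming scan
-- that emits each maximal dash run as soon as it reaches its end; alternative, same O(n) cost.

-- ===== PORT A =====
-- A's for-loop over enumerate(sep_line) carrying (bounds, in_run, start); the trailing
-- `if in_run` flush happens at the end of the list, where the carried index i = len(sep_line).
def pvAGo (cs : List Char) (i : Int) (bounds : List (Int × Int)) (in_run : Bool) (start : Int) :
    List (Int × Int) :=
  match cs with
  | [] => if in_run then bounds ++ [(start, i)] else bounds
  | c :: rest =>
    if c = '-' ∧ in_run = false then
      pvAGo rest (i + 1) bounds true i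
    else if c ≠ '-' ∧ in_run = true then
      pvAGo rest (i + 1) (bounds ++ [(start, i)]) false start
    else
      pvAGo rest (i + 1) bounds in_run start

def parse_column_boundaries_py (sep_line : String) : List (Int × Int) :=
  pvAGo sep_line.toList 0 [] false 0

-- ===== PORT B =====
-- inner `while j < n and sep_line[j] == '-'` loop: consume the dashes, return (j, remainder)
def pvConsume (cs : List Char) (j : Int) : Int × List Char :=
  match cs with
  | [] => (j, [])
  | c :: rest => if c = '-' then pvConsume rest (j + 1) else (j, c :: rest)

theorem pvConsume_len (cs : List Char) (j : Int) : (pvConsume cs j).2.length ≤ cs.length := by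
  induction cs generalizing j with
  | nil => simp [pvConsume]
  | cons c rest ih =>
    simp only [pvConsume]
    split
    · exact le_trans (ih _) (Nat.le_succ _)
    · simp

-- outer while loop: skip non-dashes; on a dash, consume the run and emit it at once
def pvBGo (cs : List Char) (i : Int) : List (Int × Int) :=
  match h : cs with
  | [] => []
  | c :: rest =>
    if c ≠ '-' then pvBGo rest (i + 1)
    else
      let p := pvConsume rest (i + 1)
      (i, p.1) :: pvBGo p.2 p.1
termination_by cs.length
decreasing_by
  · simp
  · simpa [h] using Nat.lt_succ_of_le (pvConsume_len rest (i + 1))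

def parse_column_boundaries_py_alt (sep_line : String) : List (Int × Int) :=
  pvBGo sep_line.toList 0

-- ===== PRECONDITION & SPEC =====
def Spec_parse_column_boundaries_py (sep_line : String) (out : List (Int × Int)) : Prop := out = parse_column_boundaries_py_alt sep_line
instance (sep_line : String) (out : List (Int × Int)) : Decidable (Spec_parse_column_boundaries_py sep_line out) := by unfold Spec_parse_column_boundaries_py; infer_instance

-- ===== CLAIM (what is proved, stated in full; the proofs are below) =====
def Claim_equal_parse_column_boundaries_py : Prop := ∀ (sep_line : String), Dom_parse_column_boundaries_py sep_line → Spec_parse_column_boundaries_py sep_line (parse_column_boundaries_py sep_line)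

-- ===== LEMMAS AND PROOFS =====

-- joint invariant: A's state machine in either flag state equals B's scan
theorem pvGo_eq (cs : List Char) :
    (∀ i bounds start, pvAGo cs i bounds false start = bounds ++ pvBGo cs i) ∧
    (∀ i bounds start, pvAGo cs i bounds true start =
      bounds ++ (start, (pvConsume cs i).1) :: pvBGo (pvConsume cs i).2 (pvConsume cs i).1) := by
  induction cs with
  | nil =>
    refine ⟨?_, ?_⟩ <;> intro i bounds start <;> simp [pvAGo, pvBGo, pvConsume]
  | cons c rest ih =>
    refine ⟨?_, ?_⟩ <;> intro i bounds start <;> by_cases hc : c = '-'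
    · rw [show pvAGo (c :: rest) i bounds false start = pvAGo rest (i + 1) bounds true i by
        simp [pvAGo, hc], ih.2 (i + 1) bounds i]
      simp [pvBGo, hc]
    · rw [show pvAGo (c :: rest) i bounds false start = pvAGo rest (i + 1) bounds false start by
        simp [pvAGo, hc], ih.1 (i + 1) bounds start]
      simp [pvBGo, hc]
    · rw [show pvAGo (c :: rest) i bounds true start = pvAGo rest (i + 1) bounds true start by
        simp [pvAGo, hc], ih.2 (i + 1) bounds start]
      simp [pvConsume, hc]
    · rw [show pvAGo (c :: rest) i bounds true start
          = pvAGo rest (i + 1) (bounds ++ [(start, i)]) false start by simp [pvAGo, hc],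
        ih.1 (i + 1) (bounds ++ [(start, i)]) start]
      simp [pvConsume, pvBGo, hc]

-- ===== VERDICT (by name: the statement is the Claim_ definition above) =====
theorem parse_column_boundaries_py_spec : Claim_equal_parse_column_boundaries_py := by
  intro s _
  show parse_column_boundaries_py s = parse_column_boundaries_py_alt s
  unfold parse_column_boundaries_py parse_column_boundaries_py_alt
  simpa using (pvGo_eq s.toList).1 0 [] 0
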